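-- pv_equiv track=rewrite | github.com/RemiErr/2026-python | weeks/week-08/solutions/1111405012/question-10189.py | solve_field
-- ===== SOURCE A (Python) =====
-- DIRECTIONS = [
--     (-1, -1), (-1, 0), (-1, 1),
--     (0, -1),           (0, 1),
--     (1, -1),  (1, 0),  (1, 1),
-- ]
--
-- def solve_field(grid):
--     """把一張地雷圖轉成含數字的答案圖。"""
--     rows = len(grid)
--     cols = len(grid[0])
--     answer = []
--
--     for row in range(rows):
--         current_row = []
--         for col in range(cols):
--             if grid[row][col] == "*":
--                 current_row.append("*")
--                 continue
--
--             mine_count = 0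
--             for dr, dc in DIRECTIONS:
--                 next_row = row + dr
--                 next_col = col + dc
--                 if 0 <= next_row < rows and 0 <= next_col < cols:
--                     if grid[next_row][next_col] == "*":
--                         mine_count += 1
--
--             current_row.append(str(mine_count))
--
--         answer.append("".join(current_row))
--
--     return answer
-- ===== SOURCE B (Python) =====
-- def solve_field(grid):
--     """Scatter pass: each mine increments its in-bounds neighbors in a count matrix."""
--     rows = len(grid)
--     cols = len(grid[0])
--     counts = [[0] * cols for _ in range(rows)]
--     for r in range(rows):
--         for c in range(cols):
--             if grid[r][c] == "*":
--                 for nr in range(max(r - 1, 0), min(r + 2, rows)):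
--                     for nc in range(max(c - 1, 0), min(c + 2, cols)):
--                         counts[nr][nc] += 1
--     return [
--         "".join("*" if grid[r][c] == "*" else str(counts[r][c]) for c in range(cols))
--         for r in range(rows)
--     ]
-- ===== Notes on version B (the rewrite author's own statement) =====
-- stated objective: faster
-- what changed: Replaces A's per-cell 8-direction gather (re-scanning all 8 neighbors for every non-mine cell) with a single scatter pass: each mine increments its in-bounds neighbors in a rows x cols count matrix, and rows are then emitted from that matrix.
import Mathlib
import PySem

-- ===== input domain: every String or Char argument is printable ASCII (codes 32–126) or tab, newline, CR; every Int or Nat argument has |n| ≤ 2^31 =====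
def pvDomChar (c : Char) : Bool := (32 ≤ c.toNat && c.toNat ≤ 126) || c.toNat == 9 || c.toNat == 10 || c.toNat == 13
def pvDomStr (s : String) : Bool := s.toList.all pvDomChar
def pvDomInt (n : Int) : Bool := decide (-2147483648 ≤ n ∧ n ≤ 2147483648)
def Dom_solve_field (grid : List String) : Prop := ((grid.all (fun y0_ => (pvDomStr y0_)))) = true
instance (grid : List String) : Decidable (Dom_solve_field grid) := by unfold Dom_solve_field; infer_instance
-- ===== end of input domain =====

-- B replaces A's per-cell 8-direction gather with one scatter pass over the mines into a count
-- matrix (objective: alternative algorithm, same exact output).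

-- ===== PORT A =====
-- shared grid-read helper: grid[r][c] for indices the Python code only reads in range
def pvCell (grid : List String) (r c : Nat) : Char :=
  ((grid.getD r "").toList).getD c ' '

def pvDirections : List (Int × Int) :=
  [(-1, -1), (-1, 0), (-1, 1), (0, -1), (0, 1), (1, -1), (1, 0), (1, 1)]

-- A's inner loop: count mines among the 8 in-bounds neighbors of (row, col)
def pvGather (grid : List String) (rows cols row col : Nat) : Int :=
  pvDirections.foldl (fun mine_count d =>
    let next_row : Int := (row : Int) + d.1
    let next_col : Int := (col : Int) + d.2
    if 0 ≤ next_row ∧ next_row < (rows : Int) ∧ 0 ≤ next_col ∧ next_col < (cols : Int) then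
      if pvCell grid next_row.toNat next_col.toNat = '*' then mine_count + 1 else mine_count
    else mine_count) 0

def solve_field (grid : List String) : List String :=
  let rows := grid.length
  let cols := (grid.headD "").toList.length
  (List.range rows).map (fun row =>
    PySem.Str.join "" ((List.range cols).map (fun col =>
      if pvCell grid row col = '*' then "*"
      else PySem.Int.toStr (pvGather grid rows cols row col))))

-- ===== PORT B =====
-- inner loop of Source B: for nc in range(max(c-1,0), min(c+2,cols)): row[nc] += 1
def pvBump (rowL : List Int) (a b : Nat) : List Int :=
  (List.range' a (b - a)).foldl (fun rw nc => rw.modify nc (· + 1)) rowL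

-- per-mine loop of Source B: for nr in range(max(r-1,0), min(r+2,rows)): counts[nr] bumped
def pvScatter (rows cols : Nat) (m : List (List Int)) (r c : Nat) : List (List Int) :=
  (List.range' (r - 1) (min (r + 2) rows - (r - 1))).foldl
    (fun m nr => m.modify nr (fun rowL => pvBump rowL (c - 1) (min (c + 2) cols))) m

-- the two scanning loops of Source B building the count matrix
def pvCounts (grid : List String) (rows cols : Nat) : List (List Int) :=
  (List.range rows).foldl (fun m r =>
    (List.range cols).foldl (fun m c =>
      if pvCell grid r c = '*' then pvScatter rows cols m r c else m) m)
    (List.replicate rows (List.replicate cols (0 : Int)))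

def solve_field_alt (grid : List String) : List String :=
  let rows := grid.length
  let cols := (grid.headD "").toList.length
  let counts := pvCounts grid rows cols
  (List.range rows).map (fun r =>
    PySem.Str.join "" ((List.range cols).map (fun c =>
      if pvCell grid r c = '*' then "*"
      else PySem.Int.toStr ((counts.getD r []).getD c 0))))

-- ===== PRECONDITION & SPEC =====
-- Pre_ excludes exactly the inputs on which A raises (IndexError): the empty grid (grid[0]) and
-- jagged grids in which some row is shorter than the first row (grid[row][col] out of range).
-- B raises on exactly the same inputs.
def Pre_solve_field (grid : List String) : Prop :=
  grid ≠ [] ∧ ∀ s ∈ grid, (grid.headD "").toList.length ≤ s.toList.length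
instance (grid : List String) : Decidable (Pre_solve_field grid) := by
  unfold Pre_solve_field; infer_instance
def pvWitness_solve_field : List String := ["*1", "11"]

def Spec_solve_field (grid : List String) (out : List String) : Prop := out = solve_field_alt grid
instance (grid : List String) (out : List String) : Decidable (Spec_solve_field grid out) := by
  unfold Spec_solve_field; infer_instance

-- ===== CLAIM (what is proved, stated in full; the proofs are below) =====
def Claim_equal_solve_field : Prop :=
  ∀ (grid : List String), Dom_solve_field grid → Pre_solve_field grid →
    Spec_solve_field grid (solve_field grid)

-- ===== LEMMAS AND PROOFS =====

-- contribution of the mine at (r, c) to the count at (row, col)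
def pvDelta (grid : List String) (row col r c : Nat) : Int :=
  if pvCell grid r c = '*' then
    if (r ≤ row + 1 ∧ row ≤ r + 1) ∧ (c ≤ col + 1 ∧ col ≤ c + 1) then 1 else 0
  else 0

def pvRowSum (grid : List String) (row col cols r : Nat) : Int :=
  ((List.range cols).map (fun c => pvDelta grid row col r c)).sum

-- count of c in a half-open interval list
theorem pv_count_range' (a n c : Nat) :
    (List.range' a n).count c = if a ≤ c ∧ c < a + n then 1 else 0 := by
  induction n generalizing a with
  | zero => simp
  | succ n ih =>
    rw [List.range'_succ, List.count_cons, ih (a + 1)]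
    by_cases h : a = c <;> split_ifs <;> simp_all <;> omega

-- getD through modify
theorem pv_getD_modify_eq {α : Type} {l : List α} {j : Nat} (h : j < l.length)
    (f : α → α) (d : α) : (l.modify j f).getD j d = f (l.getD j d) := by
  simp [List.getD, List.getElem?_modify_eq, List.getElem?_eq_getElem h]

theorem pv_getD_modify_ne {α : Type} {l : List α} {i j : Nat} (h : i ≠ j)
    (f : α → α) (d : α) : (l.modify j f).getD i d = l.getD i d := by
  simp [List.getD, List.getElem?_modify_ne f l (Ne.symm h)]

-- value of a row after the inner bump loop
theorem pv_bump_getD (L : List Nat) (rowL : List Int) (c : Nat) (h : c < rowL.length) :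
    (L.foldl (fun rw nc => rw.modify nc (· + 1)) rowL).getD c 0
      = rowL.getD c 0 + (L.count c : Int) := by
  induction L generalizing rowL with
  | nil => simp
  | cons nc L ih =>
    simp only [List.foldl_cons, List.count_cons]
    rw [ih _ (by simpa using h)]
    by_cases hc : nc = c
    · subst hc; rw [pv_getD_modify_eq h]; simp; ring
    · rw [pv_getD_modify_ne (Ne.symm hc)]; simp [hc]

theorem pv_bump_length (rowL : List Int) (a b : Nat) :
    (pvBump rowL a b).length = rowL.length := by
  unfold pvBump
  generalize (List.range' a (b - a)) = L
  induction L generalizing rowL with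
  | nil => rfl
  | cons nc L ih => simp [ih]

-- matrix shape invariant
def pvShape (rows cols : Nat) (m : List (List Int)) : Prop :=
  m.length = rows ∧ ∀ i, i < rows → (m.getD i []).length = cols

-- value of row r after a fold of modifies
theorem pv_fold_modify_getD (L : List Nat) (F : List Int → List Int)
    (m : List (List Int)) (r : Nat) (h : r < m.length) :
    ((L.foldl (fun m nr => m.modify nr F) m).getD r []) = F^[L.count r] (m.getD r []) := by
  induction L generalizing m with
  | nil => simp
  | cons nr L ih =>
    simp only [List.foldl_cons, List.count_cons]
    rw [ih _ (by simpa using h)]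
    by_cases hc : nr = r
    · subst hc
      rw [pv_getD_modify_eq h]
      simp [Function.iterate_succ_apply]
    · rw [pv_getD_modify_ne (Ne.symm hc)]
      simp [hc]

theorem pv_fold_modify_length (L : List Nat) (F : List Int → List Int)
    (m : List (List Int)) :
    (L.foldl (fun m nr => m.modify nr F) m).length = m.length := by
  induction L generalizing m with
  | nil => rfl
  | cons nr L ih => simp [ih]

-- value at (row, col) after one pvScatter
theorem pv_scatter_getD (rows cols : Nat) (m : List (List Int)) (mr mc row col : Nat)
    (hm : pvShape rows cols m) (hr : row < rows) (hc : col < cols) :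
    (((pvScatter rows cols m mr mc).getD row []).getD col 0)
      = (m.getD row []).getD col 0
        + (if (mr ≤ row + 1 ∧ row ≤ mr + 1) ∧ (mc ≤ col + 1 ∧ col ≤ mc + 1) then 1 else 0) := by
  obtain ⟨hlen, hrows⟩ := hm
  unfold pvScatter
  rw [pv_fold_modify_getD _ _ _ _ (by omega), pv_count_range']
  by_cases hR : mr ≤ row + 1 ∧ row ≤ mr + 1
  · rw [if_pos (show mr - 1 ≤ row ∧ row < mr - 1 + (min (mr + 2) rows - (mr - 1)) by omega)]
    simp only [Function.iterate_one]
    unfold pvBump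
    rw [pv_bump_getD _ _ _ (by rw [hrows row hr]; omega), pv_count_range']
    by_cases hC : mc ≤ col + 1 ∧ col ≤ mc + 1
    · rw [if_pos (show mc - 1 ≤ col ∧ col < mc - 1 + (min (mc + 2) cols - (mc - 1)) by omega)]
      simp [hR, hC]
    · rw [if_neg (show ¬(mc - 1 ≤ col ∧ col < mc - 1 + (min (mc + 2) cols - (mc - 1))) by omega)]
      simp [hC]
  · rw [if_neg (show ¬(mr - 1 ≤ row ∧ row < mr - 1 + (min (mr + 2) rows - (mr - 1))) by omega)]
    simp [hR]

theorem pv_scatter_shape (rows cols : Nat) (m : List (List Int)) (mr mc : Nat)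
    (hm : pvShape rows cols m) : pvShape rows cols (pvScatter rows cols m mr mc) := by
  obtain ⟨hlen, hrows⟩ := hm
  unfold pvScatter
  constructor
  · rw [pv_fold_modify_length, hlen]
  · intro i hi
    rw [pv_fold_modify_getD _ _ _ _ (by omega)]
    generalize (List.range' (mr - 1) (min (mr + 2) rows - (mr - 1))).count i = k
    induction k with
    | zero => simpa using hrows i hi
    | succ k ihk => rw [Function.iterate_succ_apply', pv_bump_length]; exact ihk

-- generic accumulation lemma
theorem pv_foldl_obs {α M : Type} (L : List α) (step : M → α → M) (δ : α → Int)
    (Inv : M → Prop) (obs : M → Int)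
    (h : ∀ m x, Inv m → obs (step m x) = obs m + δ x ∧ Inv (step m x)) :
    ∀ m, Inv m → obs (L.foldl step m) = obs m + (L.map δ).sum ∧ Inv (L.foldl step m) := by
  induction L with
  | nil => intro m hm; exact ⟨by simp, hm⟩
  | cons x L ih =>
    intro m hm
    obtain ⟨h1, h2⟩ := h m x hm
    obtain ⟨h3, h4⟩ := ih (step m x) h2
    refine ⟨?_, h4⟩
    simp only [List.foldl_cons, List.map_cons, List.sum_cons]
    rw [h3, h1]; ring

-- the count matrix holds, at (row, col), the number of mines in the 3x3 window
theorem pv_counts_getD (grid : List String) (rows cols row col : Nat)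
    (hr : row < rows) (hc : col < cols) :
    ((pvCounts grid rows cols).getD row []).getD col 0
      = ((List.range rows).map (fun r => pvRowSum grid row col cols r)).sum := by
  unfold pvCounts
  have inner : ∀ (r : Nat) (m : List (List Int)), pvShape rows cols m →
      (fun m => (m.getD row []).getD col 0)
          ((List.range cols).foldl (fun m c =>
            if pvCell grid r c = '*' then pvScatter rows cols m r c else m) m)
        = (m.getD row []).getD col 0 + pvRowSum grid row col cols r
      ∧ pvShape rows cols ((List.range cols).foldl (fun m c =>
            if pvCell grid r c = '*' then pvScatter rows cols m r c else m) m) := by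
    intro r m hm
    exact pv_foldl_obs (List.range cols) _ (fun c => pvDelta grid row col r c) (pvShape rows cols)
      (fun m => (m.getD row []).getD col 0)
      (by
        intro m c hm'
        dsimp only
        by_cases hg : pvCell grid r c = '*'
        · constructor
          · rw [if_pos hg, pv_scatter_getD rows cols m r c row col hm' hr hc]
            unfold pvDelta; rw [if_pos hg]
          · rw [if_pos hg]; exact pv_scatter_shape rows cols m r c hm'
        · refine ⟨?_, by rwa [if_neg hg]⟩
          rw [if_neg hg]; unfold pvDelta; rw [if_neg hg]; ring) m hm
  have outer := pv_foldl_obs (List.range rows)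
    (fun m r => (List.range cols).foldl (fun m c =>
        if pvCell grid r c = '*' then pvScatter rows cols m r c else m) m)
    (fun r => pvRowSum grid row col cols r) (pvShape rows cols)
    (fun m => (m.getD row []).getD col 0)
    (fun m r hm => ⟨(inner r m hm).1, (inner r m hm).2⟩)
    (List.replicate rows (List.replicate cols (0 : Int)))
    (by
      constructor
      · simp
      · intro i hi; simp [List.getD, hi])
  have h := outer.1
  dsimp only at h
  rw [h]
  simp [List.getD, hr]

-- the window-collapse lemma: a sum whose terms vanish outside {t-1, t, t+1}
theorem pv_window (n t : Nat) (f : Nat → Int)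
    (h0 : ∀ m, m < n → ¬(t ≤ m + 1 ∧ m ≤ t + 1) → f m = 0) :
    ((List.range n).map f).sum
      = (if 1 ≤ t ∧ t - 1 < n then f (t - 1) else 0)
        + (if t < n then f t else 0) + (if t + 1 < n then f (t + 1) else 0) := by
  induction n with
  | zero => simp
  | succ n ih =>
    rw [List.range_succ, List.map_append, List.sum_append,
      ih (fun m hm => h0 m (by omega))]
    simp only [List.map_cons, List.map_nil, List.sum_cons, List.sum_nil, add_zero]
    by_cases e1 : n + 1 = t
    · subst e1
      simp only [Nat.add_sub_cancel]
      split_ifs <;> (first | (exfalso; omega) | ring1)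
    · by_cases e2 : n = t
      · subst e2
        split_ifs <;> (first | (exfalso; omega) | ring1)
      · by_cases e3 : n = t + 1
        · subst e3
          split_ifs <;> (first | (exfalso; omega) | ring1)
        · have hz : f n = 0 := h0 n (by omega) (by omega)
          rw [hz]
          split_ifs <;> (first | (exfalso; omega) | ring1)

-- 0/1 mine indicator
def pvW (grid : List String) (r c : Nat) : Int :=
  if pvCell grid r c = '*' then 1 else 0

-- canonical 8-neighbor sum (guards pre-simplified for row < rows, col < cols)
def pvC (grid : List String) (rows cols row col : Nat) : Int :=
  (if 1 ≤ row ∧ 1 ≤ col then pvW grid (row - 1) (col - 1) else 0)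
    + (if 1 ≤ row then pvW grid (row - 1) col else 0)
    + (if 1 ≤ row ∧ col + 1 < cols then pvW grid (row - 1) (col + 1) else 0)
    + (if 1 ≤ col then pvW grid row (col - 1) else 0)
    + (if col + 1 < cols then pvW grid row (col + 1) else 0)
    + (if row + 1 < rows ∧ 1 ≤ col then pvW grid (row + 1) (col - 1) else 0)
    + (if row + 1 < rows then pvW grid (row + 1) col else 0)
    + (if row + 1 < rows ∧ col + 1 < cols then pvW grid (row + 1) (col + 1) else 0)

theorem pv_termA (grid : List String) (rows cols : Nat) (a b : Int) (rr cc : Nat)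
    (Q : Prop) [Decidable Q]
    (h1 : (0 ≤ a ∧ a < (rows : Int) ∧ 0 ≤ b ∧ b < (cols : Int)) ↔ Q)
    (h2 : Q → a.toNat = rr ∧ b.toNat = cc) :
    (if 0 ≤ a ∧ a < (rows : Int) ∧ 0 ≤ b ∧ b < (cols : Int) then pvW grid a.toNat b.toNat else 0)
      = (if Q then pvW grid rr cc else 0) := by
  by_cases hq : Q
  · rw [if_pos (h1.mpr hq), if_pos hq, (h2 hq).1, (h2 hq).2]
  · rw [if_neg (fun hh => hq (h1.mp hh)), if_neg hq]

theorem pv_step_eq (grid : List String) (rows cols row col : Nat) :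
    (fun (mine_count : Int) (d : Int × Int) =>
      let next_row : Int := (row : Int) + d.1
      let next_col : Int := (col : Int) + d.2
      if 0 ≤ next_row ∧ next_row < (rows : Int) ∧ 0 ≤ next_col ∧ next_col < (cols : Int) then
        if pvCell grid next_row.toNat next_col.toNat = '*' then mine_count + 1 else mine_count
      else mine_count)
    = (fun (acc : Int) (d : Int × Int) =>
        acc + (if 0 ≤ (row : Int) + d.1 ∧ (row : Int) + d.1 < (rows : Int)
                  ∧ 0 ≤ (col : Int) + d.2 ∧ (col : Int) + d.2 < (cols : Int)
               then pvW grid ((row : Int) + d.1).toNat ((col : Int) + d.2).toNat else 0)) := by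
  funext acc d
  unfold pvW
  dsimp only
  split_ifs <;> ring

theorem pv_gather_eq_C (grid : List String) (rows cols row col : Nat)
    (hrow : row < rows) (hcol : col < cols) :
    pvGather grid rows cols row col = pvC grid rows cols row col := by
  unfold pvGather
  rw [pv_step_eq grid rows cols row col]
  unfold pvDirections
  simp only [List.foldl_cons, List.foldl_nil]
  rw [pv_termA grid rows cols ((row : Int) + -1) ((col : Int) + -1) (row - 1) (col - 1)
      (1 ≤ row ∧ 1 ≤ col) (by omega) (by intro h; constructor <;> omega),
    pv_termA grid rows cols ((row : Int) + -1) ((col : Int) + 0) (row - 1) col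
      (1 ≤ row) (by omega) (by intro h; constructor <;> omega),
    pv_termA grid rows cols ((row : Int) + -1) ((col : Int) + 1) (row - 1) (col + 1)
      (1 ≤ row ∧ col + 1 < cols) (by omega) (by intro h; constructor <;> omega),
    pv_termA grid rows cols ((row : Int) + 0) ((col : Int) + -1) row (col - 1)
      (1 ≤ col) (by omega) (by intro h; constructor <;> omega),
    pv_termA grid rows cols ((row : Int) + 0) ((col : Int) + 1) row (col + 1)
      (col + 1 < cols) (by omega) (by intro h; constructor <;> omega),
    pv_termA grid rows cols ((row : Int) + 1) ((col : Int) + -1) (row + 1) (col - 1)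
      (row + 1 < rows ∧ 1 ≤ col) (by omega) (by intro h; constructor <;> omega),
    pv_termA grid rows cols ((row : Int) + 1) ((col : Int) + 0) (row + 1) col
      (row + 1 < rows) (by omega) (by intro h; constructor <;> omega),
    pv_termA grid rows cols ((row : Int) + 1) ((col : Int) + 1) (row + 1) (col + 1)
      (row + 1 < rows ∧ col + 1 < cols) (by omega) (by intro h; constructor <;> omega)]
  unfold pvC
  ring

theorem pv_if_add3 (P : Prop) [Decidable P] (x y z : Int) :
    (if P then x + y + z else 0)
      = (if P then x else 0) + (if P then y else 0) + (if P then z else 0) := by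
  split_ifs <;> ring

theorem pv_if_if (P Q : Prop) [Decidable P] [Decidable Q] (x : Int) :
    (if P then (if Q then x else 0) else 0) = (if P ∧ Q then x else 0) := by
  split_ifs <;> simp_all

theorem pv_termB (grid : List String) (row col rr cc : Nat) (P Q : Prop)
    [Decidable P] [Decidable Q] (hiff : P ↔ Q)
    (hwin : Q → (rr ≤ row + 1 ∧ row ≤ rr + 1) ∧ (cc ≤ col + 1 ∧ col ≤ cc + 1)) :
    (if P then pvDelta grid row col rr cc else 0) = (if Q then pvW grid rr cc else 0) := by
  by_cases hq : Q
  · rw [if_pos (hiff.mpr hq), if_pos hq]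
    unfold pvDelta pvW
    rw [if_pos (hwin hq)]
  · rw [if_neg (fun h => hq (hiff.mp h)), if_neg hq]

theorem pv_rowsum_eq (grid : List String) (row col cols r : Nat) :
    pvRowSum grid row col cols r
      = (if 1 ≤ col ∧ col - 1 < cols then pvDelta grid row col r (col - 1) else 0)
        + (if col < cols then pvDelta grid row col r col else 0)
        + (if col + 1 < cols then pvDelta grid row col r (col + 1) else 0) := by
  unfold pvRowSum
  exact pv_window cols col (fun c => pvDelta grid row col r c) (by
    intro c hc hw
    dsimp only
    unfold pvDelta
    split_ifs <;> (first | (exfalso; omega) | rfl))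

theorem pv_sum_eq_C (grid : List String) (rows cols row col : Nat)
    (hrow : row < rows) (hcol : col < cols) (hg : ¬ pvCell grid row col = '*') :
    ((List.range rows).map (fun r => pvRowSum grid row col cols r)).sum
      = pvC grid rows cols row col := by
  rw [pv_window rows row (fun r => pvRowSum grid row col cols r) (by
      intro r hr hw
      dsimp only
      rw [pv_rowsum_eq]
      unfold pvDelta
      split_ifs <;> (first | (exfalso; omega) | ring1))]
  rw [pv_rowsum_eq grid row col cols (row - 1), pv_rowsum_eq grid row col cols row,
    pv_rowsum_eq grid row col cols (row + 1)]
  have hmid : pvDelta grid row col row col = 0 := by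
    unfold pvDelta; rw [if_neg hg]
  rw [hmid]
  simp only [pv_if_add3, ite_self, pv_if_if]
  rw [pv_termB grid row col (row - 1) (col - 1)
      ((1 ≤ row ∧ row - 1 < rows) ∧ (1 ≤ col ∧ col - 1 < cols)) (1 ≤ row ∧ 1 ≤ col)
      (by omega) (by intro h; exact ⟨by omega, by omega⟩),
    pv_termB grid row col (row - 1) col
      ((1 ≤ row ∧ row - 1 < rows) ∧ col < cols) (1 ≤ row)
      (by omega) (by intro h; exact ⟨by omega, by omega⟩),
    pv_termB grid row col (row - 1) (col + 1)
      ((1 ≤ row ∧ row - 1 < rows) ∧ col + 1 < cols) (1 ≤ row ∧ col + 1 < cols)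
      (by omega) (by intro h; exact ⟨by omega, by omega⟩),
    pv_termB grid row col row (col - 1)
      (row < rows ∧ (1 ≤ col ∧ col - 1 < cols)) (1 ≤ col)
      (by omega) (by intro h; exact ⟨by omega, by omega⟩),
    pv_termB grid row col row (col + 1)
      (row < rows ∧ col + 1 < cols) (col + 1 < cols)
      (by omega) (by intro h; exact ⟨by omega, by omega⟩),
    pv_termB grid row col (row + 1) (col - 1)
      (row + 1 < rows ∧ (1 ≤ col ∧ col - 1 < cols)) (row + 1 < rows ∧ 1 ≤ col)
      (by omega) (by intro h; exact ⟨by omega, by omega⟩),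
    pv_termB grid row col (row + 1) col
      (row + 1 < rows ∧ col < cols) (row + 1 < rows)
      (by omega) (by intro h; exact ⟨by omega, by omega⟩),
    pv_termB grid row col (row + 1) (col + 1)
      (row + 1 < rows ∧ col + 1 < cols) (row + 1 < rows ∧ col + 1 < cols)
      (by omega) (by intro h; exact ⟨by omega, by omega⟩)]
  unfold pvC
  ring

-- per-cell bridge: A's gather equals the 3x3-window sum of mines
theorem pv_gather_eq_sum (grid : List String) (rows cols row col : Nat)
    (hrow : row < rows) (hcol : col < cols) (hg : ¬ pvCell grid row col = '*') :
    pvGather grid rows cols row col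
      = ((List.range rows).map (fun r => pvRowSum grid row col cols r)).sum := by
  rw [pv_gather_eq_C grid rows cols row col hrow hcol,
    pv_sum_eq_C grid rows cols row col hrow hcol hg]

-- per-cell equality of emitted strings
theorem pv_cell_eq (grid : List String) (row col : Nat)
    (hrow : row < grid.length) (hcol : col < (grid.headD "").toList.length) :
    (if pvCell grid row col = '*' then "*"
      else PySem.Int.toStr (pvGather grid grid.length ((grid.headD "").toList.length) row col))
    = (if pvCell grid row col = '*' then "*"
      else PySem.Int.toStr (((pvCounts grid grid.length ((grid.headD "").toList.length)).getD row []).getD col 0)) := by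
  by_cases hg : pvCell grid row col = '*'
  · rw [if_pos hg, if_pos hg]
  · rw [if_neg hg, if_neg hg,
      pv_counts_getD grid _ _ row col hrow hcol,
      pv_gather_eq_sum grid _ _ row col hrow hcol hg]

-- ===== VERDICT (by name: the statement is the Claim_ definition above) =====
theorem solve_field_spec : Claim_equal_solve_field := by
  intro grid _ _
  unfold Spec_solve_field solve_field solve_field_alt
  apply List.map_congr_left
  intro row hrow
  rw [List.mem_range] at hrow
  congr 1
  apply List.map_congr_left
  intro col hcol
  rw [List.mem_range] at hcol
  exact pv_cell_eq grid row col hrow hcol
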